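-- pv_equiv track=rewrite | github.com/Bgzdl/Multi-model-NER | utils.py | calculate_ner_accuracy
-- ===== SOURCE A (Python) =====
-- def calculate_ner_accuracy(gold_named_entity, pred_named_entity):
--     correct_predictions = 0
--     total_pred_entities = len(pred_named_entity)
--     total_gold_entities = len(gold_named_entity)
--
--     # 遍历预测的命名实体
--     for word, predicted_entity in pred_named_entity.items():
--         # 检查该单词是否在真实标注中且实体类型匹配
--         if word in gold_named_entity and predicted_entity == gold_named_entity[word]:
--             correct_predictions += 1
--
--     return correct_predictions, total_pred_entities, total_gold_entities
-- ===== SOURCE B (Python) =====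
-- def calculate_ner_accuracy(gold_named_entity, pred_named_entity):
--     gold_sorted = sorted(gold_named_entity.items())
--     pred_sorted = sorted(pred_named_entity.items())
--     correct_predictions = 0
--     i = 0
--     j = 0
--     while i < len(gold_sorted) and j < len(pred_sorted):
--         if gold_sorted[i] < pred_sorted[j]:
--             i += 1
--         elif pred_sorted[j] < gold_sorted[i]:
--             j += 1
--         else:
--             correct_predictions += 1
--             i += 1
--             j += 1
--     return correct_predictions, len(pred_named_entity), len(gold_named_entity)
-- ===== Notes on version B (the rewrite author's own statement) =====
-- stated objective: alternative
-- what changed: replaces the per-prediction dict probe by sorting both item lists and counting agreeing (word, entity) pairs with a two-pointer merge scan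
import Mathlib
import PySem

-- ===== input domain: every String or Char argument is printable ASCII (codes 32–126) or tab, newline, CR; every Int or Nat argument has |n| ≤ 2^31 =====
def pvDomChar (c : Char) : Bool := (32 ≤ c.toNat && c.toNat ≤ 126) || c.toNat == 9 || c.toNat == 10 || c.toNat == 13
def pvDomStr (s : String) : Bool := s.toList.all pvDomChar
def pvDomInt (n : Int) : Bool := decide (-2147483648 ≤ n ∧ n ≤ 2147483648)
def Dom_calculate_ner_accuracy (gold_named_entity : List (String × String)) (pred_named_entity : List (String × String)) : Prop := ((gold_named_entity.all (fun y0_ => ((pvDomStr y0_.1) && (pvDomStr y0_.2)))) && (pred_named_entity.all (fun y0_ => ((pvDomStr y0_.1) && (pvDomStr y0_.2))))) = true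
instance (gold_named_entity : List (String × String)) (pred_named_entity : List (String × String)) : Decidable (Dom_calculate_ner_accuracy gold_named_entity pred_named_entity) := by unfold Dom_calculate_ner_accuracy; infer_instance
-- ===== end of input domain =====

-- B sorts both item lists and counts agreeing pairs with a two-pointer merge scan
-- instead of probing gold per predicted item; objective: alternative.
-- ===== PORT A =====
def calculate_ner_accuracy (gold_named_entity : List (String × String)) (pred_named_entity : List (String × String)) : Int × Int × Int :=
  let correct_predictions : Int := 0
  let total_pred_entities : Int := pred_named_entity.length
  let total_gold_entities : Int := gold_named_entity.length
  let correct_predictions :=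
    pred_named_entity.foldl (fun acc p =>
      match (PySem.Dict.mk gold_named_entity).get? p.1 with
      | some v => if p.2 == v then acc + 1 else acc
      | none => acc) correct_predictions
  (correct_predictions, total_pred_entities, total_gold_entities)

-- ===== PORT B =====
-- Python's `<` on (str, str) tuples: lexicographic, exact on these pairs.
def pvPairLt (a b : String × String) : Bool := a.1 < b.1 || (a.1 == b.1 && a.2 < b.2)

-- hand port of `sorted` on pair lists (stable insertion sort with the tuple order);
-- exact: same multiset, nondecreasing in pvPairLt, stable.
def pvInsertPair (x : String × String) : List (String × String) → List (String × String)
  | [] => [x]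
  | y :: ys => if pvPairLt x y then x :: y :: ys else y :: pvInsertPair x ys

def pvSortPairs : List (String × String) → List (String × String)
  | [] => []
  | x :: xs => pvInsertPair x (pvSortPairs xs)

-- the while loop over indices i, j, transcribed as recursion on the two suffixes
def pvMergeCount : List (String × String) → List (String × String) → Int
  | [], _ => 0
  | _ :: _, [] => 0
  | a :: g, b :: p =>
    if pvPairLt a b then pvMergeCount g (b :: p)
    else if pvPairLt b a then pvMergeCount (a :: g) p
    else 1 + pvMergeCount g p

def calculate_ner_accuracy_alt (gold_named_entity : List (String × String)) (pred_named_entity : List (String × String)) : Int × Int × Int :=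
  let gold_sorted := pvSortPairs gold_named_entity
  let pred_sorted := pvSortPairs pred_named_entity
  let correct_predictions := pvMergeCount gold_sorted pred_sorted
  (correct_predictions, (pred_named_entity.length : Int), (gold_named_entity.length : Int))

-- ===== PRECONDITION & SPEC =====
-- Pre_ excludes association lists with duplicate keys: they do not represent Python dicts
-- (both A and B take dicts, whose keys are unique), so nothing is claimed there.
def Pre_calculate_ner_accuracy (gold_named_entity : List (String × String)) (pred_named_entity : List (String × String)) : Prop :=
  (gold_named_entity.map Prod.fst).Nodup ∧ (pred_named_entity.map Prod.fst).Nodup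
instance (gold_named_entity : List (String × String)) (pred_named_entity : List (String × String)) : Decidable (Pre_calculate_ner_accuracy gold_named_entity pred_named_entity) := by unfold Pre_calculate_ner_accuracy; infer_instance
def pvWitness_calculate_ner_accuracy : (List (String × String)) × (List (String × String)) :=
  ([("Paris", "LOC"), ("Bob", "PER")], [("Paris", "LOC"), ("Bob", "ORG")])
def Spec_calculate_ner_accuracy (gold_named_entity : List (String × String)) (pred_named_entity : List (String × String)) (out : Int × Int × Int) : Prop := out = calculate_ner_accuracy_alt gold_named_entity pred_named_entity
instance (gold_named_entity : List (String × String)) (pred_named_entity : List (String × String)) (out : Int × Int × Int) : Decidable (Spec_calculate_ner_accuracy gold_named_entity pred_named_entity out) := by unfold Spec_calculate_ner_accuracy; infer_instance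

-- ===== CLAIM =====
def Claim_equal_calculate_ner_accuracy : Prop := ∀ (gold_named_entity : List (String × String)) (pred_named_entity : List (String × String)), Dom_calculate_ner_accuracy gold_named_entity pred_named_entity → Pre_calculate_ner_accuracy gold_named_entity pred_named_entity → Spec_calculate_ner_accuracy gold_named_entity pred_named_entity (calculate_ner_accuracy gold_named_entity pred_named_entity)

-- ===== LEMMAS AND PROOFS =====

-- basic order facts about pvPairLt
theorem pvPairLt_irrefl (a : String × String) : pvPairLt a a = false := by
  simp [pvPairLt]

theorem pvPairLt_trans {a b c : String × String} (h1 : pvPairLt a b = true) (h2 : pvPairLt b c = true) : pvPairLt a c = true := by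
  simp only [pvPairLt, Bool.or_eq_true, Bool.and_eq_true, beq_iff_eq, decide_eq_true_eq] at *
  rcases h1 with h1 | ⟨e1, l1⟩ <;> rcases h2 with h2 | ⟨e2, l2⟩
  · exact Or.inl (lt_trans h1 h2)
  · exact Or.inl (e2 ▸ h1)
  · exact Or.inl (e1 ▸ h2)
  · exact Or.inr ⟨e1.trans e2, lt_trans l1 l2⟩

theorem pvPairLt_conn {a b : String × String} (h1 : pvPairLt a b = false) (h2 : pvPairLt b a = false) : a = b := by
  simp only [pvPairLt, Bool.or_eq_false_iff, Bool.and_eq_false_iff, beq_eq_false_iff_ne, ne_eq,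
    decide_eq_false_iff_not, not_lt] at h1 h2
  obtain ⟨hf1, hs1⟩ := h1
  obtain ⟨hf2, hs2⟩ := h2
  have ef : a.1 = b.1 := le_antisymm hf2 hf1
  have es : a.2 = b.2 := le_antisymm (hs2.resolve_left (fun h => h ef.symm)) (hs1.resolve_left (fun h => h ef))
  exact Prod.ext ef es

theorem pvPairLt_ne {a b : String × String} (h : pvPairLt a b = true) : a ≠ b := by
  intro e; subst e; simp [pvPairLt_irrefl] at h

-- insertion keeps the multiset
theorem pvInsertPair_perm (x : String × String) (l : List (String × String)) : (pvInsertPair x l).Perm (x :: l) := by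
  induction l with
  | nil => simp [pvInsertPair]
  | cons y ys ih =>
    simp only [pvInsertPair]
    split
    · exact List.Perm.refl _
    · exact (List.Perm.cons y ih).trans (List.Perm.swap x y ys)

theorem pvSortPairs_perm (l : List (String × String)) : (pvSortPairs l).Perm l := by
  induction l with
  | nil => simp [pvSortPairs]
  | cons x xs ih => exact (pvInsertPair_perm x (pvSortPairs xs)).trans (List.Perm.cons x ih)

-- insertion of a fresh element keeps strict sortedness
theorem pvInsertPair_pairwise (x : String × String) (l : List (String × String))
    (hs : l.Pairwise (fun a b => pvPairLt a b = true)) (hx : ∀ y ∈ l, x ≠ y) :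
    (pvInsertPair x l).Pairwise (fun a b => pvPairLt a b = true) := by
  induction l with
  | nil => simp [pvInsertPair]
  | cons y ys ih =>
    rcases List.pairwise_cons.mp hs with ⟨hy, hys⟩
    simp only [pvInsertPair]
    split
    · rename_i hlt
      refine List.pairwise_cons.mpr ⟨?_, hs⟩
      intro z hz
      rcases List.mem_cons.mp hz with e | hz
      · rw [e]; exact hlt
      · exact pvPairLt_trans hlt (hy z hz)
    · rename_i hnlt
      have hyx : pvPairLt y x = true := by
        by_contra h
        have := pvPairLt_conn (Bool.eq_false_iff.mpr (fun hh => hnlt hh)) (Bool.eq_false_iff.mpr h)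
        exact hx y List.mem_cons_self this
      refine List.pairwise_cons.mpr ⟨?_, ih hys (fun z hz => hx z (List.mem_cons_of_mem _ hz))⟩
      intro z hz
      have hz' : z ∈ x :: ys := (pvInsertPair_perm x ys).mem_iff.mp hz
      rcases List.mem_cons.mp hz' with e | hz''
      · rw [e]; exact hyx
      · exact hy z hz''

theorem pvSortPairs_pairwise (l : List (String × String)) (hnd : l.Nodup) :
    (pvSortPairs l).Pairwise (fun a b => pvPairLt a b = true) := by
  induction l with
  | nil => simp [pvSortPairs]
  | cons x xs ih =>
    rcases List.nodup_cons.mp hnd with ⟨hx, hxs⟩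
    refine pvInsertPair_pairwise x _ (ih hxs) ?_
    intro y hy e
    exact hx (e ▸ (pvSortPairs_perm xs).mem_iff.mp hy)

-- the merge scan counts exactly the predicted pairs present in gold
theorem pvMergeCount_eq : ∀ (g p : List (String × String)),
    g.Pairwise (fun a b => pvPairLt a b = true) → p.Pairwise (fun a b => pvPairLt a b = true) →
    pvMergeCount g p = ((p.filter (fun x => g.contains x)).length : Int)
  | [], p, _, _ => by simp [pvMergeCount]
  | a :: g, [], _, _ => by simp [pvMergeCount]
  | a :: g, b :: p, hg, hp => by
    rcases List.pairwise_cons.mp hg with ⟨ha, hg'⟩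
    rcases List.pairwise_cons.mp hp with ⟨hb, hp'⟩
    simp only [pvMergeCount]
    split
    · rename_i hab
      -- a < b: a is below everything in b :: p, so it never matches
      have hne : ∀ x ∈ b :: p, (a :: g).contains x = g.contains x := by
        intro x hx
        have hax : pvPairLt a x = true := by
          rcases List.mem_cons.mp hx with e | hx'
          · rw [e]; exact hab
          · exact pvPairLt_trans hab (hb x hx')
        have : x ≠ a := fun e => pvPairLt_ne hax e.symm
        simp [this]
      rw [pvMergeCount_eq g (b :: p) hg' hp, List.filter_congr hne]
    · rename_i hab
      split
      · rename_i hba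
        -- b < a: b is below everything in a :: g, so it is not present
        have hnb : (a :: g).contains b = false := by
          simp only [List.contains_eq_any_beq, List.any_eq_false]
          intro x hx
          have hbx : pvPairLt b x = true := by
            rcases List.mem_cons.mp hx with e | hx'
            · rw [e]; exact hba
            · exact pvPairLt_trans hba (ha x hx')
          simpa using pvPairLt_ne hbx
        rw [pvMergeCount_eq (a :: g) p hg hp', List.filter_cons, hnb]
        simp
      · rename_i hba
        -- neither: a = b, a match
        have e : a = b := pvPairLt_conn (Bool.eq_false_iff.mpr (fun h => hab h)) (Bool.eq_false_iff.mpr (fun h => hba h))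
        have hcb : (a :: g).contains b = true := by simp [e]
        have hrest : ∀ x ∈ p, (a :: g).contains x = g.contains x := by
          intro x hx
          have hax : pvPairLt a x = true := e ▸ hb x hx
          have : x ≠ a := fun ee => pvPairLt_ne hax ee.symm
          simp [this]
        rw [pvMergeCount_eq g p hg' hp', List.filter_cons, hcb, List.filter_congr hrest]
        simp only [if_true, List.length_cons]
        push_cast
        ring

-- first-match lookup in a dup-free association list finds exactly the members
theorem pv_get?_mk_iff_mem (gold : List (String × String)) (hnd : (gold.map Prod.fst).Nodup)
    (w e : String) : (PySem.Dict.mk gold).get? w = some e ↔ (w, e) ∈ gold := by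
  have hk : (PySem.Dict.mk gold).keys.Nodup := by
    simpa [PySem.Dict.keys_mk] using hnd
  simpa using PySem.Dict.get?_eq_some_iff_mem_items (d := PySem.Dict.mk gold) (k := w) (v := e) hk

-- one loop step of A counts p exactly when the pair p is an item of gold
theorem pv_step (gold : List (String × String)) (hnd : (gold.map Prod.fst).Nodup)
    (p : String × String) (acc : Int) :
    (match (PySem.Dict.mk gold).get? p.1 with
     | some v => if p.2 == v then acc + 1 else acc
     | none => acc) = if gold.contains p then acc + 1 else acc := by
  have hc : gold.contains p = decide (p ∈ gold) := by simp
  cases h : (PySem.Dict.mk gold).get? p.1 with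
  | none =>
    have hnm : p ∉ gold := fun hm => by
      have := (pv_get?_mk_iff_mem gold hnd p.1 p.2).mpr hm
      simp [h] at this
    simp [hnm]
  | some v =>
    by_cases he : p.2 = v
    · have hm : p ∈ gold := by
        have := (pv_get?_mk_iff_mem gold hnd p.1 p.2).mp (by rw [he]; exact h)
        simpa using this
      simp [he, hm]
    · have hnm : p ∉ gold := fun hm => by
        have := (pv_get?_mk_iff_mem gold hnd p.1 p.2).mpr hm
        rw [h] at this
        exact he (Option.some.inj this).symm
      simp [he, hnm]

theorem pv_foldl (gold : List (String × String)) (hnd : (gold.map Prod.fst).Nodup) :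
    ∀ (pred : List (String × String)) (acc : Int),
    pred.foldl (fun acc p =>
      match (PySem.Dict.mk gold).get? p.1 with
      | some v => if p.2 == v then acc + 1 else acc
      | none => acc) acc
      = acc + ((pred.filter (fun p => gold.contains p)).length : Int)
  | [], acc => by simp
  | p :: rest, acc => by
    rw [List.foldl_cons, pv_foldl gold hnd rest, pv_step gold hnd p acc]
    by_cases h : p ∈ gold <;> simp [h] <;> omega

-- ===== VERDICT =====
theorem calculate_ner_accuracy_spec : Claim_equal_calculate_ner_accuracy := by
  intro gold pred _ hpre
  have hgnd : gold.Nodup := (List.Nodup.of_map _ hpre.1)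
  have hpnd : pred.Nodup := (List.Nodup.of_map _ hpre.2)
  have hcg : ∀ x, (pvSortPairs gold).contains x = gold.contains x := by
    intro x
    simp only [List.contains_eq_any_beq]
    by_cases h : x ∈ gold
    · have h' : x ∈ pvSortPairs gold := (pvSortPairs_perm gold).mem_iff.mpr h
      rw [List.any_eq_true.mpr ⟨x, h', by simp⟩, List.any_eq_true.mpr ⟨x, h, by simp⟩]
    · have h' : x ∉ pvSortPairs gold := fun hh => h ((pvSortPairs_perm gold).mem_iff.mp hh)
      rw [List.any_eq_false.mpr, List.any_eq_false.mpr]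
      · intro y hy hbe
        exact h (by rw [eq_of_beq hbe]; exact hy)
      · intro y hy hbe
        exact h' (by rw [eq_of_beq hbe]; exact hy)
  have hfilter : ((pvSortPairs pred).filter (fun x => (pvSortPairs gold).contains x)).length
      = (pred.filter (fun p => gold.contains p)).length := by
    have h1 : ((pvSortPairs pred).filter (fun x => (pvSortPairs gold).contains x))
        = ((pvSortPairs pred).filter (fun x => gold.contains x)) := by
      apply List.filter_congr; intro x _; exact hcg x
    rw [h1]
    exact ((pvSortPairs_perm pred).filter _).length_eq
  have hfilterZ : (((pvSortPairs pred).filter (fun x => (pvSortPairs gold).contains x)).length : Int)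
      = ((pred.filter (fun p => gold.contains p)).length : Int) := by exact_mod_cast hfilter
  unfold Spec_calculate_ner_accuracy calculate_ner_accuracy calculate_ner_accuracy_alt
  simp only [pv_foldl gold hpre.1 pred 0, zero_add,
    pvMergeCount_eq _ _ (pvSortPairs_pairwise gold hgnd) (pvSortPairs_pairwise pred hpnd), hfilterZ]
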